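-- pv_equiv track=rewrite | github.com/cirosantilli/project-euler-solvers | solvers/374.py | best_partition
-- ===== SOURCE A (Python) =====
-- import math
--
-- def max_base_k(n: int) -> int:
--     """
--     Let S_k = 2+3+...+k = k*(k+1)//2 - 1.
--     For each n>=2 there is a unique k>=2 such that S_k <= n <= S_{k+1}-1.
--
--     Return that k (the "base" maximum element for the optimal partition).
--     """
--     # Solve k(k+1)/2 - 1 <= n  =>  k^2+k-2(n+1) <= 0
--     d = 1 + 8 * (n + 1)
--     s = math.isqrt(d)
--     k = (s - 1) // 2
--     # adjust for any integer sqrt rounding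
--     while k * (k + 1) // 2 - 1 > n:
--         k -= 1
--     while (k + 1) * (k + 2) // 2 - 1 <= n:
--         k += 1
--     return k
--
-- def best_partition(n: int) -> list[int]:
--     """
--     Construct an optimal (max-product) partition of n into distinct parts.
--
--     Used only for small-value tests (exact arithmetic).
--     """
--     if n <= 0:
--         raise ValueError("n must be positive")
--     if n == 1:
--         return [1]
--
--     k = max_base_k(n)
--     if k == 2:
--         # Only one part is possible/optimal in this range.
--         return [n]
--
--     parts = list(range(2, k + 1))  # 2..k (k-1 parts)
--     t = k - 1
--     r = n - (k * (k + 1) // 2 - 1)  # remainder within this k-block, 0..k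
--     q, s = divmod(r, t)  # for k>=3, q is 0 or 1
--     if q:
--         for i in range(t):
--             parts[i] += q
--     if s:
--         # add 1 to the largest s parts
--         for i in range(t - 1, t - s - 1, -1):
--             parts[i] += 1
--     return parts
-- ===== SOURCE B (Python) =====
-- def best_partition(n: int) -> list[int]:
--     if n <= 0:
--         raise ValueError("n must be positive")
--     if n == 1:
--         return [1]
--     # largest k>=2 with k(k+1)//2 - 1 <= n
--     k = 2
--     while (k + 1) * (k + 2) // 2 - 1 <= n:
--         k += 1
--     r = n - (k * (k + 1) // 2 - 1)  # 0 <= r <= k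
--     if r < k:
--         return [j for j in range(2, k + 2) if j != k + 1 - r]
--     else:
--         return [j for j in range(3, k + 3) if j != k + 1]
-- ===== Notes on version B (the rewrite author's own statement) =====
-- stated objective: simpler
-- what changed: B replaces A's isqrt-plus-adjustment search and the two index-mutating increment loops (divmod remainder distribution) by a single incrementing search for k and a one-shot construction: a consecutive run of integers with exactly one element filtered out; the k==2 special case disappears.
import Mathlib
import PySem

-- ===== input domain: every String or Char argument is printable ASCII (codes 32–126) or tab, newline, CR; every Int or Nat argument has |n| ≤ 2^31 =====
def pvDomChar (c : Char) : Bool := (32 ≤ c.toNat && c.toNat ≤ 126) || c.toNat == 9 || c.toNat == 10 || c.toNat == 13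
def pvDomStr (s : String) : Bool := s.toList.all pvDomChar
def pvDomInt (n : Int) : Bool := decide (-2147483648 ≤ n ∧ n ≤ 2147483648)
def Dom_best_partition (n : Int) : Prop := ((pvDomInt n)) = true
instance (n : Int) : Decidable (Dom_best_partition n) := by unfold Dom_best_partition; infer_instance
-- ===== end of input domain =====

-- B builds the partition as one consecutive run with a single element filtered out,
-- replacing A's isqrt-based k search and its two in-place increment loops (objective: simpler).


-- ===== PORT A =====
-- 'while k*(k+1)//2 - 1 > n: k -= 1' (fuel makes it total; enough fuel is proved below)
def mbkDown : Nat → Int → Int → Int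
  | 0, k, _ => k
  | f+1, k, n =>
      if PySem.Int.floordiv (k * (k + 1)) 2 - 1 > n then mbkDown f (k - 1) n else k

-- 'while (k+1)*(k+2)//2 - 1 <= n: k += 1'
def mbkUp : Nat → Int → Int → Int
  | 0, k, _ => k
  | f+1, k, n =>
      if PySem.Int.floordiv ((k + 1) * (k + 2)) 2 - 1 ≤ n then mbkUp f (k + 1) n else k

-- math.isqrt(d) = Nat.sqrt d.toNat (exact: d ≥ 0 on every admitted input)
def max_base_k (n : Int) : Int :=
  let d := 1 + 8 * (n + 1)
  let s : Int := (Nat.sqrt d.toNat : Int)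
  let k := PySem.Int.floordiv (s - 1) 2
  mbkUp (n.toNat + 3) (mbkDown (n.toNat + 3) k n) n

-- A raises ValueError for n ≤ 0 (excluded by Pre_); the port returns [] there.
def best_partition (n : Int) : List Int :=
  if n ≤ 0 then []
  else if n = 1 then [1]
  else
    let k := max_base_k n
    if k = 2 then [n]
    else
      let parts := PySem.List.pyRange 2 (k + 1) 1
      let t := k - 1
      let r := n - (PySem.Int.floordiv (k * (k + 1)) 2 - 1)
      let q := PySem.Int.floordiv r t
      let s := PySem.Int.mod r t
      let parts :=
        if q ≠ 0 then
          (PySem.List.pyRange 0 t 1).foldl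
            (fun ps i => PySem.List.pySetD ps i (PySem.List.pyGetD ps i 0 + q)) parts
        else parts
      let parts :=
        if s ≠ 0 then
          (PySem.List.pyRange (t - 1) (t - s - 1) (-1)).foldl
            (fun ps i => PySem.List.pySetD ps i (PySem.List.pyGetD ps i 0 + 1)) parts
        else parts
      parts

-- ===== PORT B =====
-- 'while (k+1)*(k+2)//2 - 1 <= n: k += 1' starting from 2 (fuel makes it total)
def altFindK : Nat → Int → Int → Int
  | 0, k, _ => k
  | f+1, k, n =>
      if PySem.Int.floordiv ((k + 1) * (k + 2)) 2 - 1 ≤ n then altFindK f (k + 1) n else k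

-- B raises for n ≤ 0 exactly as A does; the port returns [] there.
def best_partition_alt (n : Int) : List Int :=
  if n ≤ 0 then []
  else if n = 1 then [1]
  else
    let k := altFindK (n.toNat + 3) 2 n
    let r := n - (PySem.Int.floordiv (k * (k + 1)) 2 - 1)
    if r < k then
      (PySem.List.pyRange 2 (k + 2) 1).filter (fun j => decide (j ≠ k + 1 - r))
    else
      (PySem.List.pyRange 3 (k + 3) 1).filter (fun j => decide (j ≠ k + 1))

-- ===== PRECONDITION & SPEC =====
-- Pre_ excludes exactly n ≤ 0, where the Python A raises ValueError.
def Pre_best_partition (n : Int) : Prop := 1 ≤ n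
instance (n : Int) : Decidable (Pre_best_partition n) := by unfold Pre_best_partition; infer_instance
def pvWitness_best_partition : Int := (13)

def Spec_best_partition (n : Int) (out : List Int) : Prop := out = best_partition_alt n
instance (n : Int) (out : List Int) : Decidable (Spec_best_partition n out) := by unfold Spec_best_partition; infer_instance

-- ===== CLAIM (what is proved, stated in full; the proofs are below) =====
def Claim_equal_best_partition : Prop := ∀ (n : Int), Dom_best_partition n → Pre_best_partition n → Spec_best_partition n (best_partition n)

-- ===== LEMMAS AND PROOFS =====
lemma cond_iff (k n : Int) : (PySem.Int.floordiv (k*(k+1)) 2 - 1 ≤ n) ↔ k*(k+1) < 2*n+4 := by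
  have h := PySem.Int.floordiv_lt_iff_lt_mul (a := k*(k+1)) (b := 2) (q := n+2) (by norm_num)
  generalize k*(k+1) = m at *
  generalize PySem.Int.floordiv m 2 = f at *
  omega

lemma down_spec : ∀ (f : Nat) (k n : Int), 2 ≤ n → 2 ≤ k → k < (f:Int) + 2 →
    2 ≤ mbkDown f k n ∧ (mbkDown f k n) * (mbkDown f k n + 1) < 2*n+4 := by
  intro f
  induction f with
  | zero => intro k n hn hk hf; omega
  | succ f ih =>
    intro k n hn hk hf
    rw [mbkDown]
    by_cases hc : PySem.Int.floordiv (k*(k+1)) 2 - 1 > n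
    · have hnot : ¬ (k*(k+1) < 2*n+4) := by
        rw [← cond_iff]; omega
      have hk3 : 3 ≤ k := by
        rcases eq_or_lt_of_le hk with h | h
        · exfalso; apply hnot; nlinarith
        · omega
      rw [if_pos hc]
      exact ih (k-1) n hn (by omega) (by push_cast at hf ⊢; omega)
    · rw [if_neg hc]
      refine ⟨hk, ?_⟩
      rw [← cond_iff]; omega

lemma cond_iff2 (k n : Int) : (PySem.Int.floordiv ((k+1)*(k+2)) 2 - 1 ≤ n) ↔ (k+1)*(k+2) < 2*n+4 := by
  have h := PySem.Int.floordiv_lt_iff_lt_mul (a := (k+1)*(k+2)) (b := 2) (q := n+2) (by norm_num)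
  generalize (k+1)*(k+2) = m at *
  generalize PySem.Int.floordiv m 2 = f at *
  omega

lemma up_spec : ∀ (f : Nat) (k n : Int), 2 ≤ k → k*(k+1) < 2*n+4 → n + 2 - k ≤ (f:Int) →
    2 ≤ mbkUp f k n ∧ (mbkUp f k n) * (mbkUp f k n + 1) < 2*n+4 ∧
      ¬ ((mbkUp f k n + 1) * (mbkUp f k n + 2) < 2*n+4) := by
  intro f
  induction f with
  | zero =>
    intro k n hk hlo hf
    rw [mbkUp]
    refine ⟨hk, hlo, ?_⟩
    push_cast at hf
    nlinarith
  | succ f ih =>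
    intro k n hk hlo hf
    rw [mbkUp]
    by_cases hc : PySem.Int.floordiv ((k+1)*(k+2)) 2 - 1 ≤ n
    · have h2 : (k+1)*(k+2) < 2*n+4 := (cond_iff2 k n).mp hc
      rw [if_pos hc]
      exact ih (k+1) n (by omega) (by nlinarith) (by push_cast at hf ⊢; omega)
    · rw [if_neg hc]
      refine ⟨hk, hlo, ?_⟩
      intro hcon
      exact hc ((cond_iff2 k n).mpr hcon)

lemma good_unique (n k k' : Int) (hk : 2 ≤ k) (h1 : k*(k+1) < 2*n+4) (h2 : ¬((k+1)*(k+2) < 2*n+4))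
    (hk' : 2 ≤ k') (h1' : k'*(k'+1) < 2*n+4) (h2' : ¬((k'+1)*(k'+2) < 2*n+4)) : k = k' := by
  by_contra hne
  rcases lt_or_gt_of_ne hne with h | h
  · apply h2; nlinarith
  · apply h2'; nlinarith
lemma altFindK_eq_mbkUp : ∀ (f : Nat) (k n : Int), altFindK f k n = mbkUp f k n := by
  intro f
  induction f with
  | zero => intro k n; rfl
  | succ f ih =>
    intro k n
    rw [altFindK, mbkUp]
    split_ifs with h
    · exact ih (k+1) n
    · rfl

lemma max_base_k_good (n : Int) (hn : 2 ≤ n) :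
    2 ≤ max_base_k n ∧ (max_base_k n)*(max_base_k n + 1) < 2*n+4 ∧
      ¬ ((max_base_k n + 1)*(max_base_k n + 2) < 2*n+4) := by
  rw [show max_base_k n
      = mbkUp (n.toNat+3) (mbkDown (n.toNat+3)
          (PySem.Int.floordiv (((Nat.sqrt (1 + 8*(n+1)).toNat : Int)) - 1) 2) n) n from rfl]
  have hNn : (n.toNat : Int) = n := Int.toNat_of_nonneg (by omega)
  have hd : (1 + 8*(n+1)).toNat = 8*n.toNat + 9 := by omega
  rw [hd]
  set s0 := Nat.sqrt (8*n.toNat+9) with hs0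
  have h5 : 5 ≤ s0 := by
    exact Nat.le_sqrt'.mpr (by omega)
  have hupN : s0 ≤ n.toNat + 3 := by
    have h := Nat.sqrt_lt' (m := 8*n.toNat+9) (n := n.toNat+4)
    have : s0 < n.toNat + 4 := h.mpr (by nlinarith [Int.toNat_of_nonneg (show (0:Int) ≤ n by omega)])
    omega
  set k0 := PySem.Int.floordiv ((s0:Int) - 1) 2 with hk0
  have hk02 : 2 ≤ k0 := by
    rw [hk0, PySem.Int.le_floordiv_iff_mul_le (by norm_num)]
    push_cast; omega
  have hk0up : k0 < (n.toNat:Int) + 5 := by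
    rw [hk0, PySem.Int.floordiv_lt_iff_lt_mul (by norm_num)]
    omega
  have hdown := down_spec (n.toNat+3) k0 n hn hk02 (by push_cast; omega)
  exact up_spec (n.toNat+3) _ n hdown.1 hdown.2 (by omega)

lemma altK_eq (n : Int) (hn : 2 ≤ n) : altFindK (n.toNat+3) 2 n = max_base_k n := by
  rw [altFindK_eq_mbkUp]
  have h6 : (2:Int)*(2+1) < 2*n+4 := by norm_num; omega
  have hB := up_spec (n.toNat+3) 2 n le_rfl h6 (by push_cast; omega)
  have hA := max_base_k_good n hn
  exact good_unique n _ _ hB.1 hB.2.1 hB.2.2 hA.1 hA.2.1 hA.2.2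
lemma pyRange_map_add (a b c : Int) :
    (PySem.List.pyRange a b 1).map (· + c) = PySem.List.pyRange (a+c) (b+c) 1 := by
  rw [PySem.List.pyRange_one, PySem.List.pyRange_one, List.map_map]
  rw [show b + c - (a + c) = b - a from by ring]
  exact List.map_congr_left (fun k _ => by simp [Function.comp]; ring)

lemma bump_all (c : Int) : ∀ (m : Nat) (L : List Int), m ≤ L.length →
    (List.range m).foldl
      (fun ps (i:Nat) => PySem.List.pySetD ps (i:Int) (PySem.List.pyGetD ps (i:Int) 0 + c)) L
    = (L.take m).map (· + c) ++ L.drop m := by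
  intro m
  induction m with
  | zero => intro L _; simp
  | succ m ih =>
    intro L hm
    have hmL : m < L.length := by omega
    rw [List.range_succ, List.foldl_append, ih L (by omega)]
    simp only [List.foldl_cons, List.foldl_nil, PySem.List.pySetD_natCast, PySem.List.pyGetD_natCast]
    have hlen : ((L.take m).map (· + c)).length = m := by simp [List.length_take]; omega
    rw [List.drop_eq_getElem_cons hmL]
    rw [List.getD_append_right _ _ _ _ (by omega), hlen]
    simp only [Nat.sub_self, List.getD_cons_zero]
    rw [List.set_append]
    simp only [hlen, lt_irrefl, Nat.sub_self, List.set_cons_zero]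
    simp only [if_false]
    rw [List.take_add_one, List.getElem?_eq_getElem hmL]
    simp
    rw [List.take_add_one, List.getElem?_map, List.getElem?_eq_getElem hmL]
    simp
lemma bump_desc (T : Nat) : ∀ (s : Nat) (L : List Int), L.length = T → s ≤ T →
    (List.range s).foldl
      (fun ps (j:Nat) => PySem.List.pySetD ps ((T:Int)-1-(j:Int)) (PySem.List.pyGetD ps ((T:Int)-1-(j:Int)) 0 + 1)) L
    = L.take (T - s) ++ (L.drop (T - s)).map (· + 1) := by
  intro s
  induction s with
  | zero =>
    intro L hL _
    rw [Nat.sub_zero, ← hL, List.take_length, List.drop_length]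
    simp
  | succ s ih =>
    intro L hL hs
    have hp : T - 1 - s < T - s := by omega
    have hpL : T - 1 - s < L.length := by omega
    rw [List.range_succ, List.foldl_append, ih L hL (by omega)]
    simp only [List.foldl_cons, List.foldl_nil]
    rw [show (T:Int) - 1 - (s:Int) = ((T - 1 - s : Nat) : Int) from by omega]
    rw [PySem.List.pySetD_natCast, PySem.List.pyGetD_natCast]
    have hlen : (L.take (T - s)).length = T - s := by simp [List.length_take]; omega
    rw [List.getD_append _ _ _ _ (by omega), List.getD_eq_getElem _ _ (by simp [List.length_take]; omega),
        List.getElem_take]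
    rw [List.set_append]
    rw [if_pos (by omega)]
    -- set at the last position of the take-part
    have htk : L.take (T - s) = L.take (T - 1 - s) ++ [L[T - 1 - s]] := by
      rw [show T - s = (T - 1 - s) + 1 from by omega, List.take_add_one,
          List.getElem?_eq_getElem hpL]
      simp
    have hset : (L.take (T - s)).set (T - 1 - s) (L[T - 1 - s] + 1)
        = L.take (T - 1 - s) ++ [L[T - 1 - s] + 1] := by
      rw [htk, List.set_append, if_neg (by simp only [List.length_take]; omega)]
      have hsi : T - 1 - s - (L.take (T - 1 - s)).length = 0 := by
        simp only [List.length_take]; omega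
      rw [hsi, List.set_cons_zero]
    rw [hset]
    rw [show T - (s+1) = T - 1 - s from by omega]
    rw [List.drop_eq_getElem_cons hpL]
    rw [show T - s = (T-1-s) + 1 from by omega]
    simp
    conv_rhs => rw [List.drop_eq_getElem_cons
      (show T - 1 - s < (List.map (fun x => x + 1) L).length by simpa using hpL)]
    simp
lemma loop1_eq (c : Int) (L : List Int) :
    (PySem.List.pyRange 0 (L.length : Int) 1).foldl
      (fun ps i => PySem.List.pySetD ps i (PySem.List.pyGetD ps i 0 + c)) L
    = L.map (· + c) := by
  rw [PySem.List.pyRange_one, List.foldl_map]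
  rw [show ((L.length : Int) - 0).toNat = L.length from by omega]
  have h := bump_all c L.length L le_rfl
  simp only [zero_add] at h ⊢
  rw [h, List.take_length, List.drop_length]
  simp

lemma loop2_eq (s : Nat) (L : List Int) (hs : s ≤ L.length) :
    (PySem.List.pyRange ((L.length:Int) - 1) ((L.length:Int) - (s:Int) - 1) (-1)).foldl
      (fun ps i => PySem.List.pySetD ps i (PySem.List.pyGetD ps i 0 + 1)) L
    = L.take (L.length - s) ++ (L.drop (L.length - s)).map (· + 1) := by
  rw [PySem.List.pyRange_neg_one, List.foldl_map]
  rw [show ((L.length:Int) - 1 - ((L.length:Int) - (s:Int) - 1)).toNat = s from by omega]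
  exact bump_desc L.length s L rfl hs

lemma pyRange_take (a b : Int) (m : Nat) (h : a + (m:Int) ≤ b) :
    (PySem.List.pyRange a b 1).take m = PySem.List.pyRange a (a + (m:Int)) 1 := by
  rw [PySem.List.pyRange_one_append a (a + (m:Int)) b (by omega) h]
  exact List.take_left' (by rw [PySem.List.length_pyRange_one]; omega)

lemma pyRange_drop (a b : Int) (m : Nat) (h : a + (m:Int) ≤ b) :
    (PySem.List.pyRange a b 1).drop m = PySem.List.pyRange (a + (m:Int)) b 1 := by
  rw [PySem.List.pyRange_one_append a (a + (m:Int)) b (by omega) h]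
  exact List.drop_left' (by rw [PySem.List.length_pyRange_one]; omega)

lemma pyRange_filter_ne (a b x : Int) (h : x < a ∨ b ≤ x) :
    (PySem.List.pyRange a b 1).filter (fun j => decide (j ≠ x)) = PySem.List.pyRange a b 1 :=
  List.filter_eq_self.mpr (fun y hy => by
    rcases PySem.List.mem_pyRange_one.mp hy with ⟨h1, h2⟩
    simp; omega)
lemma filter_split (k r : Int) (h2 : 2 ≤ k + 1 - r) (hub : r ≥ 0) :
    (PySem.List.pyRange 2 (k+2) 1).filter (fun j => decide (j ≠ k+1-r))
    = PySem.List.pyRange 2 (k+1-r) 1 ++ PySem.List.pyRange (k+2-r) (k+2) 1 := by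
  rw [PySem.List.pyRange_one_append 2 (k+1-r) (k+2) h2 (by omega),
      PySem.List.pyRange_one_append (k+1-r) (k+2-r) (k+2) (by omega) (by omega),
      List.filter_append, List.filter_append,
      pyRange_filter_ne 2 (k+1-r) (k+1-r) (Or.inr (le_refl (k+1-r))),
      pyRange_filter_ne (k+2-r) (k+2) (k+1-r) (Or.inl (by omega)),
      show PySem.List.pyRange (k+1-r) (k+2-r) 1 = [k+1-r] from by
        rw [show k+2-r = (k+1-r)+1 from by ring, PySem.List.pyRange_one_singleton]]
  simp

lemma bp_eq_of_two_le (n : Int) (hn : 2 ≤ n) (h1 : ¬ n = 1) (h0 : ¬ n ≤ 0) :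
    best_partition n = best_partition_alt n := by
  rw [best_partition, best_partition_alt]
  simp only [if_neg h0, if_neg h1]
  rw [altK_eq n hn]
  have hG := max_base_k_good n hn
  generalize hK : max_base_k n = k at hG ⊢
  obtain ⟨hk2, hlo, hhi⟩ := hG
  have hF := PySem.Int.floordiv_mul_add_mod (k*(k+1)) 2
  have h0F : PySem.Int.mod (k*(k+1)) 2 = 0 :=
    (PySem.Int.mod_eq_zero_iff_dvd (k*(k+1)) 2).mpr (Int.even_mul_succ_self k).two_dvd
  generalize hFg : PySem.Int.floordiv (k*(k+1)) 2 = F at hF ⊢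
  have hFk : 2*F = k*(k+1) := by
    generalize k*(k+1) = A at hF h0F ⊢
    omega
  have hB : (k+1)*(k+2) = 2*F + 2*k + 2 := by
    rw [show (k+1)*(k+2) = k*(k+1) + 2*k + 2 from by ring, ← hFk]
  have hlo' : 2*F < 2*n + 4 := by rw [hFk]; exact hlo
  have hhi' : ¬ (2*F + 2*k + 2 < 2*n + 4) := by rw [← hB]; exact hhi
  by_cases hk3 : k = 2
  · rw [if_pos hk3]
    subst hk3
    have hF3 : F = 3 := by omega
    subst hF3
    have hn24 : n = 2 ∨ n = 3 ∨ n = 4 := by omega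
    rcases hn24 with rfl | rfl | rfl <;> decide
  · rw [if_neg hk3]
    have hk3' : 3 ≤ k := by omega
    generalize hrg : n - (F - 1) = r at *
    have hr0 : 0 ≤ r := by omega
    have hrk : r ≤ k := by omega
    have hlen : ((PySem.List.pyRange 2 (k+1) 1).length : Int) = k - 1 := by
      rw [PySem.List.length_pyRange_one]; omega
    have hrcast : ((r.toNat : Int)) = r := Int.toNat_of_nonneg hr0
    rcases (show r < k - 1 ∨ r = k - 1 ∨ r = k from by omega) with hc | hc | hc
    · -- q = 0, s = r
      have hq : PySem.Int.floordiv r (k-1) = 0 :=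
        (PySem.Int.floordiv_eq_iff_of_pos (by omega)).mpr (by constructor <;> [simp [hr0]; simpa using hc])
      have hs : PySem.Int.mod r (k-1) = r := by
        have h := PySem.Int.floordiv_mul_add_mod r (k-1)
        rw [hq] at h; simpa using h
      rw [hq, hs, if_neg (show ¬ ((0:Int) ≠ 0) from by omega),
          if_pos (show r < k from by omega), filter_split k r (by omega) (by omega)]
      by_cases hr00 : r = 0
      · subst hr00
        rw [if_neg (show ¬ ((0:Int) ≠ 0) from by omega)]
        simp
      · rw [if_pos hr00]
        rw [show (k-1-1 : Int) = ((PySem.List.pyRange 2 (k+1) 1).length : Int) - 1 from by rw [hlen],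
            show (k-1-r-1 : Int) = ((PySem.List.pyRange 2 (k+1) 1).length : Int) - (r.toNat : Int) - 1 from by rw [hlen, hrcast]]
        rw [loop2_eq r.toNat _ (by omega)]
        rw [pyRange_take 2 (k+1) _ (by omega), pyRange_drop 2 (k+1) _ (by omega),
            pyRange_map_add]
        rw [show (2 + (((PySem.List.pyRange 2 (k+1) 1).length - r.toNat : Nat)) : Int) = k + 1 - r from by omega]
        rw [show (k + 1 - r + 1 : Int) = k + 2 - r from by ring, show (k + 1 + 1 : Int) = k + 2 from by ring]
    · -- r = k - 1 : q = 1, s = 0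
      have hq : PySem.Int.floordiv r (k-1) = 1 :=
        (PySem.Int.floordiv_eq_iff_of_pos (by omega)).mpr (by constructor <;> omega)
      have hs : PySem.Int.mod r (k-1) = 0 := by
        have h := PySem.Int.floordiv_mul_add_mod r (k-1)
        rw [hq] at h; omega
      rw [hq, hs, if_neg (show ¬ ((0:Int) ≠ 0) from by omega),
          if_pos (show (1:Int) ≠ 0 from by omega),
          if_pos (show r < k from by omega), filter_split k r (by omega) (by omega)]
      rw [show (k-1 : Int) = ((PySem.List.pyRange 2 (k+1) 1).length : Int) from hlen.symm,
          loop1_eq 1 _, pyRange_map_add]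
      rw [show (k+1-r : Int) = 2 from by omega, show (k+2-r : Int) = 3 from by omega,
          PySem.List.pyRange_one_eq_nil (le_refl (2:Int)), List.nil_append,
          show (2+1 : Int) = 3 from by ring, show (k+1+1 : Int) = k+2 from by ring]
    · -- r = k : q = 1, s = 1
      have hq : PySem.Int.floordiv r (k-1) = 1 :=
        (PySem.Int.floordiv_eq_iff_of_pos (by omega)).mpr (by constructor <;> omega)
      have hs : PySem.Int.mod r (k-1) = 1 := by
        have h := PySem.Int.floordiv_mul_add_mod r (k-1)
        rw [hq] at h; omega
      rw [hq, hs, if_pos (show (1:Int) ≠ 0 from by omega),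
          if_pos (show (1:Int) ≠ 0 from by omega),
          if_neg (show ¬ (r < k) from by omega)]
      rw [show (k-1 : Int) = ((PySem.List.pyRange 2 (k+1) 1).length : Int) from hlen.symm,
          loop1_eq 1 _, pyRange_map_add, show (2+1 : Int) = 3 from by ring,
          show (k+1+1 : Int) = k+2 from by ring]
      have hlen2 : ((PySem.List.pyRange 3 (k+2) 1).length : Int) = k - 1 := by
        rw [PySem.List.length_pyRange_one]; omega
      rw [show ((PySem.List.pyRange 2 (k+1) 1).length : Int) - 1
            = ((PySem.List.pyRange 3 (k+2) 1).length : Int) - 1 from by rw [hlen, hlen2],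
          show ((PySem.List.pyRange 3 (k+2) 1).length : Int) - 1 - 1
            = ((PySem.List.pyRange 3 (k+2) 1).length : Int) - ((1:Nat) : Int) - 1 from by
              norm_num]
      rw [loop2_eq 1 _ (by omega), pyRange_take 3 (k+2) _ (by omega),
          pyRange_drop 3 (k+2) _ (by omega), pyRange_map_add]
      rw [show (3 + (((PySem.List.pyRange 3 (k+2) 1).length - 1 : Nat)) : Int) = k + 1 from by omega,
          show (k+1+1 : Int) = k+2 from by ring, show (k+2+1 : Int) = k+3 from by ring]
      rw [PySem.List.pyRange_one_append 3 (k+1) (k+3) (by omega) (by omega),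
          PySem.List.pyRange_one_append (k+1) (k+2) (k+3) (by omega) (by omega),
          List.filter_append, List.filter_append,
          pyRange_filter_ne 3 (k+1) (k+1) (Or.inr (le_refl (k+1))),
          pyRange_filter_ne (k+2) (k+3) (k+1) (Or.inl (by omega)),
          show PySem.List.pyRange (k+1) (k+2) 1 = [k+1] from by
            rw [show (k+2 : Int) = (k+1)+1 from by ring, PySem.List.pyRange_one_singleton]]
      simp

-- ===== VERDICT (by name: the statement is the Claim_ definition above) =====
theorem best_partition_spec : Claim_equal_best_partition := by
  intro n _ hpre
  unfold Spec_best_partition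
  by_cases h1 : n = 1
  · subst h1; decide
  · have hn2 : 2 ≤ n := by
      have : 1 ≤ n := hpre
      omega
    exact bp_eq_of_two_le n hn2 h1 (by omega)
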